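-- pv_equiv track=rewrite | github.com/kareevato/labs | task1(lab_6).py | sum_above_secondary_diagonal
-- ===== SOURCE A (Python) =====
-- def sum_above_secondary_diagonal(matrix):
--     n = len(matrix)
--     result = []
--     for col in range(n):
--         sum_col = 0
--         for row in range(n):
--             if row + col < n - 1:
--                 sum_col += matrix[row][col]
--         result.append(sum_col)
--     return result
-- ===== SOURCE B (Python) =====
-- def sum_above_secondary_diagonal(matrix):
--     n = len(matrix)
--     result = [0] * n
--     for d in range(n - 1):
--         for r in range(d + 1):
--             c = d - r
--             result[c] += matrix[r][c]
--     return result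
-- ===== Notes on version B (the rewrite author's own statement) =====
-- stated objective: alternative
-- what changed: Replaces A's column-outer double scan, which tests every (row,col) pair against the triangle condition, by an anti-diagonal traversal: the result list is preallocated and for each anti-diagonal d < n-1 the cells (r, d-r) are scattered into their column accumulators, so only the triangle cells are visited and no conditional is evaluated.
import Mathlib
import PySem

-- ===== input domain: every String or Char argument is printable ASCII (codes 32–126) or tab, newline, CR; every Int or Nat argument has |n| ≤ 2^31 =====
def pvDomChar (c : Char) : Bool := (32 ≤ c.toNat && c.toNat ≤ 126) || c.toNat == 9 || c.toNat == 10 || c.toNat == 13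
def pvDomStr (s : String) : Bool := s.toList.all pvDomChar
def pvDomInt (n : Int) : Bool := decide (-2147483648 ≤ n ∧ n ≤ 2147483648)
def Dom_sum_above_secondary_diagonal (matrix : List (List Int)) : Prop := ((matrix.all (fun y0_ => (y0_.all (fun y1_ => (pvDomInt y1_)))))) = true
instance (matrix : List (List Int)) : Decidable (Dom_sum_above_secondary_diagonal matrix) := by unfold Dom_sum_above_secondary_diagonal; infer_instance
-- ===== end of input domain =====

-- B replaces A's column-outer guarded double scan by an anti-diagonal traversal that
-- scatters each diagonal's cells into a preallocated accumulator (alternative decomposition;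
-- equivalence is about return values).

-- ===== PORT A =====
def sum_above_secondary_diagonal (matrix : List (List Int)) : List Int :=
  let n : Int := matrix.length
  (PySem.List.pyRange 0 n 1).foldl
    (fun result col =>
      result ++ [(PySem.List.pyRange 0 n 1).foldl
        (fun sum_col row =>
          if row + col < n - 1 then
            sum_col + PySem.List.pyGetD (PySem.List.pyGetD matrix row []) col 0
          else sum_col) 0])
    []

-- ===== PORT B =====
def sum_above_secondary_diagonal_alt (matrix : List (List Int)) : List Int :=
  let n : Int := matrix.length
  (PySem.List.pyRange 0 (n - 1) 1).foldl
    (fun result d =>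
      (PySem.List.pyRange 0 (d + 1) 1).foldl
        (fun res r =>
          let c := d - r
          PySem.List.pySetD res c
            (PySem.List.pyGetD res c 0
              + PySem.List.pyGetD (PySem.List.pyGetD matrix r []) c 0))
        result)
    (List.replicate n.toNat 0)

-- ===== PRECONDITION & SPEC =====
-- Pre_ excludes exactly the ragged matrices on which Python A raises IndexError
-- (row r shorter than the n-1-r triangle entries both programs read).
def Pre_sum_above_secondary_diagonal (matrix : List (List Int)) : Prop :=
  ∀ r ∈ List.range matrix.length, matrix.length - 1 - r ≤ (matrix.getD r []).length
instance (matrix : List (List Int)) : Decidable (Pre_sum_above_secondary_diagonal matrix) := by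
  unfold Pre_sum_above_secondary_diagonal; infer_instance
def pvWitness_sum_above_secondary_diagonal : List (List Int) := [[1, 2], [3]]
def Spec_sum_above_secondary_diagonal (matrix : List (List Int)) (out : List Int) : Prop := out = sum_above_secondary_diagonal_alt matrix
instance (matrix : List (List Int)) (out : List Int) : Decidable (Spec_sum_above_secondary_diagonal matrix out) := by unfold Spec_sum_above_secondary_diagonal; infer_instance

-- ===== CLAIM (what is proved, stated in full; the proofs are below) =====
def Claim_equal_sum_above_secondary_diagonal : Prop := ∀ (matrix : List (List Int)), Dom_sum_above_secondary_diagonal matrix → Pre_sum_above_secondary_diagonal matrix → Spec_sum_above_secondary_diagonal matrix (sum_above_secondary_diagonal matrix)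

-- ===== LEMMAS AND PROOFS =====

-- the column sum both ports compute, column j
def pvF (matrix : List (List Int)) (j : Nat) : Int :=
  ((List.range (matrix.length - 1 - j)).map
    (fun (r : Nat) => (matrix.getD r []).getD j 0)).sum

theorem foldl_ite_add {α : Type} (l : List α) (c : α → Prop) [DecidablePred c]
    (v : α → Int) (s0 : Int) :
    l.foldl (fun s x => if c x then s + v x else s) s0
      = s0 + (l.map (fun x => if c x then v x else 0)).sum := by
  induction l generalizing s0 with
  | nil => simp
  | cons a l ih => simp only [List.foldl_cons, List.map_cons, List.sum_cons, ih]; split <;> ring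

theorem flatten_map_singleton {α β : Type} (l : List α) (f : α → β) :
    (l.map (fun x => [f x])).flatten = l.map f := by
  induction l with
  | nil => rfl
  | cons a l ih => simp [ih]

-- sum over a guarded range collapses to the unguarded prefix
theorem sum_range_if_lt (N k : Nat) (g : Nat → Int) :
    ((List.range N).map (fun r => if r < k then g r else 0)).sum
      = ((List.range (min N k)).map g).sum := by
  induction N with
  | zero => simp
  | succ N ih =>
    rw [List.range_succ, List.map_append, List.sum_append]
    by_cases h : N < k
    · have : min (N + 1) k = min N k + 1 := by omega
      rw [this, List.range_succ, List.map_append, List.sum_append, ih]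
      have : min N k = N := by omega
      simp [h, this]
    · have : min (N + 1) k = min N k := by omega
      rw [this, ih]
      simp [h]

-- sum over a guarded range with a lower bound collapses to a shifted range
theorem sum_range_if_le (N j : Nat) (g : Nat → Int) :
    ((List.range N).map (fun d => if j ≤ d then g (d - j) else 0)).sum
      = ((List.range (N - j)).map g).sum := by
  induction N with
  | zero => simp
  | succ N ih =>
    rw [List.range_succ, List.map_append, List.sum_append]
    by_cases h : j ≤ N
    · have : N + 1 - j = (N - j) + 1 := by omega
      rw [this, List.range_succ, List.map_append, List.sum_append, ih]
      simp [h]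
    · have : N + 1 - j = N - j := by omega
      rw [this, ih]
      simp [h]

theorem lemA (matrix : List (List Int)) :
    sum_above_secondary_diagonal matrix
      = (List.range matrix.length).map (fun j => pvF matrix j) := by
  have h : ∀ j : Nat,
      ((List.range matrix.length).map
        (fun (r : Nat) => if (r : Int) + (j : Int) < (matrix.length : Int) - 1
                  then (matrix.getD r []).getD j 0 else 0)).sum = pvF matrix j := by
    intro j
    have hcong : ∀ r : Nat,
        (if (r : Int) + (j : Int) < (matrix.length : Int) - 1
          then (matrix.getD r []).getD j 0 else 0)
        = (if r < matrix.length - 1 - j then (matrix.getD r []).getD j 0 else 0) := by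
      intro r
      by_cases h1 : (r : Int) + (j : Int) < (matrix.length : Int) - 1
      · rw [if_pos h1, if_pos (by omega)]
      · rw [if_neg h1, if_neg (by omega)]
    calc ((List.range matrix.length).map
        (fun (r : Nat) => if (r : Int) + (j : Int) < (matrix.length : Int) - 1
                  then (matrix.getD r []).getD j 0 else 0)).sum
        = ((List.range matrix.length).map
            (fun (r : Nat) => if r < matrix.length - 1 - j
                  then (matrix.getD r []).getD j 0 else 0)).sum := by
          congr 1; exact List.map_congr_left (fun r _ => hcong r)
      _ = ((List.range (min matrix.length (matrix.length - 1 - j))).map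
            (fun (r : Nat) => (matrix.getD r []).getD j 0)).sum :=
          sum_range_if_lt _ _ _
      _ = pvF matrix j := by
          have : min matrix.length (matrix.length - 1 - j) = matrix.length - 1 - j := by omega
          rw [this]; rfl
  simp only [sum_above_secondary_diagonal]
  simp [PySem.List.pyRange_one, foldl_ite_add, List.foldl_map, flatten_map_singleton]
  intro a _
  simp only [← List.getD_eq_getElem?_getD]
  exact h a

-- Nat-level form of B's inner loop: scatter anti-diagonal d into the accumulator
def pvStep (matrix : List (List Int)) (d : Nat) (res : List Int) : List Int :=
  (List.range (d + 1)).foldl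
    (fun res r => res.set (d - r) (res.getD (d - r) 0 + (matrix.getD r []).getD (d - r) 0))
    res

-- partial inner loop, first t iterations
def pvStepT (matrix : List (List Int)) (d t : Nat) (res : List Int) : List Int :=
  (List.range t).foldl
    (fun res r => res.set (d - r) (res.getD (d - r) 0 + (matrix.getD r []).getD (d - r) 0))
    res

theorem pvStepT_length (matrix : List (List Int)) (d t : Nat) (res : List Int) :
    (pvStepT matrix d t res).length = res.length := by
  induction t with
  | zero => simp [pvStepT]
  | succ t ih =>
    rw [pvStepT, List.range_succ, List.foldl_append, List.foldl_cons, List.foldl_nil,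
      List.length_set, ← pvStepT]
    exact ih

theorem pvStepT_getD (matrix : List (List Int)) (d t : Nat) (res : List Int)
    (ht : t ≤ d + 1) (j : Nat) :
    (pvStepT matrix d t res).getD j 0
      = res.getD j 0
        + (if d + 1 - t ≤ j ∧ j ≤ d ∧ j < res.length
            then (matrix.getD (d - j) []).getD j 0 else 0) := by
  induction t generalizing j with
  | zero => simp [pvStepT]; intro h1 h2; omega
  | succ t ih =>
    have ht' : t ≤ d + 1 := by omega
    have hlen := pvStepT_length matrix d t res
    rw [pvStepT, List.range_succ, List.foldl_append, List.foldl_cons, List.foldl_nil,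
      ← pvStepT]
    by_cases hj : j = d - t
    · subst hj
      by_cases hr : d - t < res.length
      · rw [List.getD_eq_getElem?_getD, List.getElem?_set_self (by omega),
          Option.getD_some]
        rw [ih ht' (d - t)]
        have hc1 : ¬ (d + 1 - t ≤ d - t ∧ d - t ≤ d ∧ d - t < res.length) := by omega
        rw [if_neg hc1, add_zero]
        have hc2 : (d + 1 - (t + 1) ≤ d - t ∧ d - t ≤ d ∧ d - t < res.length) := by omega
        rw [if_pos hc2]
        have : d - (d - t) = t := by omega
        rw [this]
      · -- set out of range is a no-op
        rw [List.set_eq_of_length_le (by rw [pvStepT_length]; omega)]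
        rw [ih ht' (d - t)]
        have hc1 : ¬ (d + 1 - t ≤ d - t ∧ d - t ≤ d ∧ d - t < res.length) := by omega
        have hc2 : ¬ (d + 1 - (t + 1) ≤ d - t ∧ d - t ≤ d ∧ d - t < res.length) := by omega
        rw [if_neg hc1, if_neg hc2]
    · rw [List.getD_eq_getElem?_getD, List.getElem?_set_ne (by omega),
        ← List.getD_eq_getElem?_getD, ih ht' j]
      by_cases hc : d + 1 - t ≤ j ∧ j ≤ d ∧ j < res.length
      · rw [if_pos hc, if_pos (by omega)]
      · rw [if_neg hc, if_neg (by omega)]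

theorem pvStep_getD (matrix : List (List Int)) (d : Nat) (res : List Int) (j : Nat) :
    (pvStep matrix d res).getD j 0
      = res.getD j 0
        + (if j ≤ d ∧ j < res.length then (matrix.getD (d - j) []).getD j 0 else 0) := by
  have h := pvStepT_getD matrix d (d + 1) res (le_refl _) j
  rw [pvStep, ← pvStepT, h]
  have : (d + 1 - (d + 1) ≤ j ∧ j ≤ d ∧ j < res.length) ↔ (j ≤ d ∧ j < res.length) := by omega
  by_cases hc : j ≤ d ∧ j < res.length
  · rw [if_pos (this.mpr hc), if_pos hc]
  · rw [if_neg (fun h' => hc (this.mp h')), if_neg hc]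

theorem pvStep_length (matrix : List (List Int)) (d : Nat) (res : List Int) :
    (pvStep matrix d res).length = res.length := pvStepT_length matrix d (d + 1) res

-- B's fold over anti-diagonals, Nat-level
theorem lemB0 (matrix : List (List Int)) :
    sum_above_secondary_diagonal_alt matrix
      = (List.range (matrix.length - 1)).foldl
          (fun res d => pvStep matrix d res)
          (List.replicate matrix.length 0) := by
  simp only [sum_above_secondary_diagonal_alt, PySem.List.pyRange_one, Int.toNat_natCast,
    List.foldl_map]
  have hN : ((matrix.length : Int) - 1 - 0).toNat = matrix.length - 1 := by omega
  rw [hN]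
  apply PySem.List.foldl_congr_mem
  intro res k hk
  rw [List.mem_range] at hk
  have h1 : ((0 : Int) + (k : Nat) + 1 - 0).toNat = k + 1 := by omega
  rw [h1, pvStep]
  apply PySem.List.foldl_congr_mem
  intro res' i hi
  rw [List.mem_range] at hi
  have hc : (0 : Int) + (k : Int) - ((0 : Int) + (i : Int)) = ((k - i : Nat) : Int) := by omega
  rw [hc]
  simp only [zero_add, PySem.List.pySetD_natCast, PySem.List.pyGetD_natCast]

theorem lemBlen (matrix : List (List Int)) (t : Nat) (res : List Int) :
    ((List.range t).foldl (fun res d => pvStep matrix d res) res).length = res.length := by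
  induction t with
  | zero => simp
  | succ t ih =>
    rw [List.range_succ, List.foldl_append, List.foldl_cons, List.foldl_nil, pvStep_length]
    exact ih

theorem lemBinv (matrix : List (List Int)) (t : Nat) (res : List Int)
    (hres : res.length = matrix.length) (j : Nat) :
    ((List.range t).foldl (fun res d => pvStep matrix d res) res).getD j 0
      = res.getD j 0
        + ((List.range t).map
            (fun (d : Nat) => if j ≤ d ∧ j < matrix.length
                      then (matrix.getD (d - j) []).getD j 0 else 0)).sum := by
  induction t with
  | zero => simp
  | succ t ih =>
    rw [List.range_succ, List.foldl_append, List.foldl_cons, List.foldl_nil]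
    rw [pvStep_getD, ih, List.map_append, List.sum_append]
    rw [lemBlen, hres]
    simp only [List.map_cons, List.map_nil, List.sum_cons, List.sum_nil, add_zero]
    ring

theorem lemB (matrix : List (List Int)) :
    sum_above_secondary_diagonal_alt matrix
      = (List.range matrix.length).map (fun j => pvF matrix j) := by
  rw [lemB0]
  apply List.ext_getElem
  · simp [lemBlen]
  · intro j h1 h2
    have hj : j < matrix.length := by
      rw [lemBlen, List.length_replicate] at h1; exact h1
    have hD := lemBinv matrix (matrix.length - 1) (List.replicate matrix.length 0) (by simp) j
    have hrep : (List.replicate matrix.length (0 : Int)).getD j 0 = 0 := by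
      rw [List.getD_eq_getElem?_getD, List.getElem?_replicate, if_pos hj]; rfl
    rw [hrep, zero_add] at hD
    rw [List.getElem_map, List.getElem_range]
    have hget : (((List.range (matrix.length - 1)).foldl
        (fun res d => pvStep matrix d res) (List.replicate matrix.length 0)))[j]
        = (((List.range (matrix.length - 1)).foldl
        (fun res d => pvStep matrix d res) (List.replicate matrix.length 0))).getD j 0 := by
      rw [List.getD_eq_getElem?_getD, List.getElem?_eq_getElem h1]; rfl
    rw [hget, hD]
    have hcong : ∀ d : Nat,
        (if j ≤ d ∧ j < matrix.length then (matrix.getD (d - j) []).getD j 0 else 0)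
          = (if j ≤ d then (matrix.getD (d - j) []).getD j 0 else 0) := by
      intro d
      by_cases h : j ≤ d
      · rw [if_pos ⟨h, hj⟩, if_pos h]
      · rw [if_neg (fun hc => h hc.1), if_neg h]
    calc ((List.range (matrix.length - 1)).map
          (fun (d : Nat) => if j ≤ d ∧ j < matrix.length
                    then (matrix.getD (d - j) []).getD j 0 else 0)).sum
        = ((List.range (matrix.length - 1)).map
          (fun (d : Nat) => if j ≤ d
                    then (matrix.getD (d - j) []).getD j 0 else 0)).sum := by
          congr 1; exact List.map_congr_left (fun d _ => hcong d)
      _ = ((List.range (matrix.length - 1 - j)).map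
            (fun (r : Nat) => (matrix.getD r []).getD j 0)).sum :=
          sum_range_if_le (matrix.length - 1) j (fun r => (matrix.getD r []).getD j 0)
      _ = pvF matrix j := rfl

-- ===== VERDICT (by name: the statement is the Claim_ definition above) =====
theorem sum_above_secondary_diagonal_spec : Claim_equal_sum_above_secondary_diagonal := by
  intro matrix _ _
  unfold Spec_sum_above_secondary_diagonal
  rw [lemA, lemB]
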